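-- pv_equiv track=rewrite | github.com/ryandakine/football_betting_system | behavioral_intelligence_engine.py | _is_division_rival
-- ===== SOURCE A (Python) =====
-- def _is_division_rival(team_a: str, team_b: str) -> bool:
--     """Check if teams are division rivals"""
--     divisions = {
--         'AFC_EAST': ['BUF', 'MIA', 'NE', 'NYJ'],
--         'AFC_NORTH': ['BAL', 'CIN', 'CLE', 'PIT'],
--         'AFC_SOUTH': ['HOU', 'IND', 'JAX', 'TEN'],
--         'AFC_WEST': ['DEN', 'KC', 'LV', 'LAC'],
--         'NFC_EAST': ['DAL', 'NYG', 'PHI', 'WAS'],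
--         'NFC_NORTH': ['CHI', 'DET', 'GB', 'MIN'],
--         'NFC_SOUTH': ['ATL', 'CAR', 'NO', 'TB'],
--         'NFC_WEST': ['ARI', 'LAR', 'SF', 'SEA']
--     }
--
--     for division in divisions.values():
--         if team_a in division and team_b in division:
--             return True
--     return False
-- ===== SOURCE B (Python) =====
-- _DIVISIONS = {
--     'AFC_EAST': ['BUF', 'MIA', 'NE', 'NYJ'],
--     'AFC_NORTH': ['BAL', 'CIN', 'CLE', 'PIT'],
--     'AFC_SOUTH': ['HOU', 'IND', 'JAX', 'TEN'],
--     'AFC_WEST': ['DEN', 'KC', 'LV', 'LAC'],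
--     'NFC_EAST': ['DAL', 'NYG', 'PHI', 'WAS'],
--     'NFC_NORTH': ['CHI', 'DET', 'GB', 'MIN'],
--     'NFC_SOUTH': ['ATL', 'CAR', 'NO', 'TB'],
--     'NFC_WEST': ['ARI', 'LAR', 'SF', 'SEA']
-- }
--
-- # Flat map built once: team abbreviation -> division key.
-- _TEAM_DIVISION = {team: div for div, teams in _DIVISIONS.items() for team in teams}
--
--
-- def _is_division_rival(team_a: str, team_b: str) -> bool:
--     """Check if teams are division rivals"""
--     div_a = _TEAM_DIVISION.get(team_a)
--     return div_a is not None and div_a == _TEAM_DIVISION.get(team_b)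
-- ===== Notes on version B (the rewrite author's own statement) =====
-- stated objective: idiomatic
-- what changed: A scans all eight division lists testing membership of both teams in each; B flattens the table once into a single team-to-division dict and decides rivalry by two direct lookups and an equality comparison (guarded so two unknown teams are not rivals).
import Mathlib
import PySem

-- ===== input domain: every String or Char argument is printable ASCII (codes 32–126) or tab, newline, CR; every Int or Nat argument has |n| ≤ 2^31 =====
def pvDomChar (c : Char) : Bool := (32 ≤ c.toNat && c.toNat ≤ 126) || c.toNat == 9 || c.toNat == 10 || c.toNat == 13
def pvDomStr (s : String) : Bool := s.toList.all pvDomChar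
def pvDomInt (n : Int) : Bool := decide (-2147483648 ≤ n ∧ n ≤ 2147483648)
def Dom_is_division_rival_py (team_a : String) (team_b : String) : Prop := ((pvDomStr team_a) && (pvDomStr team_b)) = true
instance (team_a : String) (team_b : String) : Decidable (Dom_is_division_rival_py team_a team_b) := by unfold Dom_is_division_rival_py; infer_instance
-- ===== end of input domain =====

-- B replaces A's scan over the eight division lists by a flat team→division index built
-- once, looked up twice and compared (objective: idiomatic; same observable behaviour).

-- ===== PORT A =====
-- the dict's values() A iterates over
def divLists : List (List String) :=
  [["BUF","MIA","NE","NYJ"], ["BAL","CIN","CLE","PIT"], ["HOU","IND","JAX","TEN"],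
   ["DEN","KC","LV","LAC"], ["DAL","NYG","PHI","WAS"], ["CHI","DET","GB","MIN"],
   ["ATL","CAR","NO","TB"], ["ARI","LAR","SF","SEA"]]

-- the for-loop with early 'return True'
def rivalLoop (team_a team_b : String) : List (List String) → Bool
  | [] => false
  | d :: rest => if d.contains team_a && d.contains team_b then true else rivalLoop team_a team_b rest

def is_division_rival_py (team_a : String) (team_b : String) : Bool :=
  rivalLoop team_a team_b divLists

-- ===== PORT B =====
-- the flattening comprehension {team: div for div, teams in _DIVISIONS.items() for team in teams}, written out
def flatPairs : List (String × String) :=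
  [("BUF","AFC_EAST"),("MIA","AFC_EAST"),("NE","AFC_EAST"),("NYJ","AFC_EAST"),
   ("BAL","AFC_NORTH"),("CIN","AFC_NORTH"),("CLE","AFC_NORTH"),("PIT","AFC_NORTH"),
   ("HOU","AFC_SOUTH"),("IND","AFC_SOUTH"),("JAX","AFC_SOUTH"),("TEN","AFC_SOUTH"),
   ("DEN","AFC_WEST"),("KC","AFC_WEST"),("LV","AFC_WEST"),("LAC","AFC_WEST"),
   ("DAL","NFC_EAST"),("NYG","NFC_EAST"),("PHI","NFC_EAST"),("WAS","NFC_EAST"),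
   ("CHI","NFC_NORTH"),("DET","NFC_NORTH"),("GB","NFC_NORTH"),("MIN","NFC_NORTH"),
   ("ATL","NFC_SOUTH"),("CAR","NFC_SOUTH"),("NO","NFC_SOUTH"),("TB","NFC_SOUTH"),
   ("ARI","NFC_WEST"),("LAR","NFC_WEST"),("SF","NFC_WEST"),("SEA","NFC_WEST")]

-- _TEAM_DIVISION
def teamDivision : PySem.Dict String String := PySem.Dict.ofList flatPairs

-- div_a = _TEAM_DIVISION.get(team_a); return div_a is not None and div_a == _TEAM_DIVISION.get(team_b)
def is_division_rival_py_alt (team_a : String) (team_b : String) : Bool :=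
  match teamDivision.get? team_a with
  | none => false
  | some da => teamDivision.get? team_b == some da

-- ===== PRECONDITION & SPEC =====
def Spec_is_division_rival_py (team_a : String) (team_b : String) (out : Bool) : Prop := out = is_division_rival_py_alt team_a team_b
instance (team_a : String) (team_b : String) (out : Bool) : Decidable (Spec_is_division_rival_py team_a team_b out) := by unfold Spec_is_division_rival_py; infer_instance

-- ===== CLAIM (what is proved, stated in full; the proofs are below) =====
def Claim_equal_is_division_rival_py : Prop := ∀ (team_a : String) (team_b : String), Dom_is_division_rival_py team_a team_b → Spec_is_division_rival_py team_a team_b (is_division_rival_py team_a team_b)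

-- ===== LEMMAS AND PROOFS =====
-- the 32 team abbreviations, in table order
def allTeams : List String := flatPairs.map (·.1)

-- B's lookup, with the literal dict normalised away
theorem get?_td (x : String) :
    teamDivision.get? x = (flatPairs.find? (fun p => p.1 == x)).map (·.2) := by
  have h : teamDivision = PySem.Dict.mk flatPairs := by decide
  rw [h]
  rfl

-- if one of the teams is outside the table, both programs return false
theorem A_right_notin (a b : String) (hx : b ∉ allTeams) : is_division_rival_py a b = false := by
  simp only [allTeams, flatPairs, List.map, List.mem_cons, List.not_mem_nil, or_false, not_or] at hx
  obtain ⟨h1,h2,h3,h4,h5,h6,h7,h8,h9,h10,h11,h12,h13,h14,h15,h16,h17,h18,h19,h20,h21,h22,h23,h24,h25,h26,h27,h28,h29,h30,h31,h32⟩ := hx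
  simp [is_division_rival_py, rivalLoop, divLists, beq_eq_false_iff_ne.mpr h1, beq_eq_false_iff_ne.mpr h2, beq_eq_false_iff_ne.mpr h3, beq_eq_false_iff_ne.mpr h4, beq_eq_false_iff_ne.mpr h5, beq_eq_false_iff_ne.mpr h6, beq_eq_false_iff_ne.mpr h7, beq_eq_false_iff_ne.mpr h8, beq_eq_false_iff_ne.mpr h9, beq_eq_false_iff_ne.mpr h10, beq_eq_false_iff_ne.mpr h11, beq_eq_false_iff_ne.mpr h12, beq_eq_false_iff_ne.mpr h13, beq_eq_false_iff_ne.mpr h14, beq_eq_false_iff_ne.mpr h15, beq_eq_false_iff_ne.mpr h16, beq_eq_false_iff_ne.mpr h17, beq_eq_false_iff_ne.mpr h18, beq_eq_false_iff_ne.mpr h19, beq_eq_false_iff_ne.mpr h20, beq_eq_false_iff_ne.mpr h21, beq_eq_false_iff_ne.mpr h22, beq_eq_false_iff_ne.mpr h23, beq_eq_false_iff_ne.mpr h24, beq_eq_false_iff_ne.mpr h25, beq_eq_false_iff_ne.mpr h26, beq_eq_false_iff_ne.mpr h27, beq_eq_false_iff_ne.mpr h28, beq_eq_false_iff_ne.mpr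 h29, beq_eq_false_iff_ne.mpr h30, beq_eq_false_iff_ne.mpr h31, beq_eq_false_iff_ne.mpr h32, h1, h2, h3, h4, h5, h6, h7, h8, h9, h10, h11, h12, h13, h14, h15, h16, h17, h18, h19, h20, h21, h22, h23, h24, h25, h26, h27, h28, h29, h30, h31, h32]

theorem A_left_notin (a b : String) (hx : a ∉ allTeams) : is_division_rival_py a b = false := by
  simp only [allTeams, flatPairs, List.map, List.mem_cons, List.not_mem_nil, or_false, not_or] at hx
  obtain ⟨h1,h2,h3,h4,h5,h6,h7,h8,h9,h10,h11,h12,h13,h14,h15,h16,h17,h18,h19,h20,h21,h22,h23,h24,h25,h26,h27,h28,h29,h30,h31,h32⟩ := hx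
  simp [is_division_rival_py, rivalLoop, divLists, beq_eq_false_iff_ne.mpr h1, beq_eq_false_iff_ne.mpr h2, beq_eq_false_iff_ne.mpr h3, beq_eq_false_iff_ne.mpr h4, beq_eq_false_iff_ne.mpr h5, beq_eq_false_iff_ne.mpr h6, beq_eq_false_iff_ne.mpr h7, beq_eq_false_iff_ne.mpr h8, beq_eq_false_iff_ne.mpr h9, beq_eq_false_iff_ne.mpr h10, beq_eq_false_iff_ne.mpr h11, beq_eq_false_iff_ne.mpr h12, beq_eq_false_iff_ne.mpr h13, beq_eq_false_iff_ne.mpr h14, beq_eq_false_iff_ne.mpr h15, beq_eq_false_iff_ne.mpr h16, beq_eq_false_iff_ne.mpr h17, beq_eq_false_iff_ne.mpr h18, beq_eq_false_iff_ne.mpr h19, beq_eq_false_iff_ne.mpr h20, beq_eq_false_iff_ne.mpr h21, beq_eq_false_iff_ne.mpr h22, beq_eq_false_iff_ne.mpr h23, beq_eq_false_iff_ne.mpr h24, beq_eq_false_iff_ne.mpr h25, beq_eq_false_iff_ne.mpr h26, beq_eq_false_iff_ne.mpr h27, beq_eq_false_iff_ne.mpr h28, beq_eq_false_iff_ne.mpr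 h29, beq_eq_false_iff_ne.mpr h30, beq_eq_false_iff_ne.mpr h31, beq_eq_false_iff_ne.mpr h32, h1, h2, h3, h4, h5, h6, h7, h8, h9, h10, h11, h12, h13, h14, h15, h16, h17, h18, h19, h20, h21, h22, h23, h24, h25, h26, h27, h28, h29, h30, h31, h32]

theorem get?_notin (x : String) (hx : x ∉ allTeams) : teamDivision.get? x = none := by
  simp only [allTeams, flatPairs, List.map, List.mem_cons, List.not_mem_nil, or_false, not_or] at hx
  obtain ⟨h1,h2,h3,h4,h5,h6,h7,h8,h9,h10,h11,h12,h13,h14,h15,h16,h17,h18,h19,h20,h21,h22,h23,h24,h25,h26,h27,h28,h29,h30,h31,h32⟩ := hx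
  rw [get?_td]
  simp [flatPairs, List.find?, beq_eq_false_iff_ne.mpr (Ne.symm h1), beq_eq_false_iff_ne.mpr (Ne.symm h2), beq_eq_false_iff_ne.mpr (Ne.symm h3), beq_eq_false_iff_ne.mpr (Ne.symm h4), beq_eq_false_iff_ne.mpr (Ne.symm h5), beq_eq_false_iff_ne.mpr (Ne.symm h6), beq_eq_false_iff_ne.mpr (Ne.symm h7), beq_eq_false_iff_ne.mpr (Ne.symm h8), beq_eq_false_iff_ne.mpr (Ne.symm h9), beq_eq_false_iff_ne.mpr (Ne.symm h10), beq_eq_false_iff_ne.mpr (Ne.symm h11), beq_eq_false_iff_ne.mpr (Ne.symm h12), beq_eq_false_iff_ne.mpr (Ne.symm h13), beq_eq_false_iff_ne.mpr (Ne.symm h14), beq_eq_false_iff_ne.mpr (Ne.symm h15), beq_eq_false_iff_ne.mpr (Ne.symm h16), beq_eq_false_iff_ne.mpr (Ne.symm h17), beq_eq_false_iff_ne.mpr (Ne.symm h18), beq_eq_false_iff_ne.mpr (Ne.symm h19), beq_eq_false_iff_ne.mpr (Ne.symm h20), beq_eq_false_iff_ne.mpr (Ne.symm h21), beq_eq_false_iff_ne.mpr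 (Ne.symm h22), beq_eq_false_iff_ne.mpr (Ne.symm h23), beq_eq_false_iff_ne.mpr (Ne.symm h24), beq_eq_false_iff_ne.mpr (Ne.symm h25), beq_eq_false_iff_ne.mpr (Ne.symm h26), beq_eq_false_iff_ne.mpr (Ne.symm h27), beq_eq_false_iff_ne.mpr (Ne.symm h28), beq_eq_false_iff_ne.mpr (Ne.symm h29), beq_eq_false_iff_ne.mpr (Ne.symm h30), beq_eq_false_iff_ne.mpr (Ne.symm h31), beq_eq_false_iff_ne.mpr (Ne.symm h32)]

theorem B_left_notin (a b : String) (hx : a ∉ allTeams) : is_division_rival_py_alt a b = false := by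
  simp [is_division_rival_py_alt, get?_notin a hx]

theorem B_right_notin (a b : String) (hx : b ∉ allTeams) : is_division_rival_py_alt a b = false := by
  cases h : teamDivision.get? a <;> simp [is_division_rival_py_alt, h, get?_notin b hx]

-- one lemma per team: A and B agree when team_a is that team (case split on team_b)

theorem teamLemma1 (b : String) :
    is_division_rival_py "BUF" b = is_division_rival_py_alt "BUF" b := by
  by_cases hx : b ∈ allTeams
  · simp only [allTeams, flatPairs, List.map, List.mem_cons, List.not_mem_nil, or_false] at hx
    rcases hx with rfl|rfl|rfl|rfl|rfl|rfl|rfl|rfl|rfl|rfl|rfl|rfl|rfl|rfl|rfl|rfl|rfl|rfl|rfl|rfl|rfl|rfl|rfl|rfl|rfl|rfl|rfl|rfl|rfl|rfl|rfl|rfl <;> decide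
  · rw [A_right_notin _ b hx, B_right_notin _ b hx]

theorem teamLemma2 (b : String) :
    is_division_rival_py "MIA" b = is_division_rival_py_alt "MIA" b := by
  by_cases hx : b ∈ allTeams
  · simp only [allTeams, flatPairs, List.map, List.mem_cons, List.not_mem_nil, or_false] at hx
    rcases hx with rfl|rfl|rfl|rfl|rfl|rfl|rfl|rfl|rfl|rfl|rfl|rfl|rfl|rfl|rfl|rfl|rfl|rfl|rfl|rfl|rfl|rfl|rfl|rfl|rfl|rfl|rfl|rfl|rfl|rfl|rfl|rfl <;> decide
  · rw [A_right_notin _ b hx, B_right_notin _ b hx]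

theorem teamLemma3 (b : String) :
    is_division_rival_py "NE" b = is_division_rival_py_alt "NE" b := by
  by_cases hx : b ∈ allTeams
  · simp only [allTeams, flatPairs, List.map, List.mem_cons, List.not_mem_nil, or_false] at hx
    rcases hx with rfl|rfl|rfl|rfl|rfl|rfl|rfl|rfl|rfl|rfl|rfl|rfl|rfl|rfl|rfl|rfl|rfl|rfl|rfl|rfl|rfl|rfl|rfl|rfl|rfl|rfl|rfl|rfl|rfl|rfl|rfl|rfl <;> decide
  · rw [A_right_notin _ b hx, B_right_notin _ b hx]

theorem teamLemma4 (b : String) :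
    is_division_rival_py "NYJ" b = is_division_rival_py_alt "NYJ" b := by
  by_cases hx : b ∈ allTeams
  · simp only [allTeams, flatPairs, List.map, List.mem_cons, List.not_mem_nil, or_false] at hx
    rcases hx with rfl|rfl|rfl|rfl|rfl|rfl|rfl|rfl|rfl|rfl|rfl|rfl|rfl|rfl|rfl|rfl|rfl|rfl|rfl|rfl|rfl|rfl|rfl|rfl|rfl|rfl|rfl|rfl|rfl|rfl|rfl|rfl <;> decide
  · rw [A_right_notin _ b hx, B_right_notin _ b hx]

theorem teamLemma5 (b : String) :
    is_division_rival_py "BAL" b = is_division_rival_py_alt "BAL" b := by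
  by_cases hx : b ∈ allTeams
  · simp only [allTeams, flatPairs, List.map, List.mem_cons, List.not_mem_nil, or_false] at hx
    rcases hx with rfl|rfl|rfl|rfl|rfl|rfl|rfl|rfl|rfl|rfl|rfl|rfl|rfl|rfl|rfl|rfl|rfl|rfl|rfl|rfl|rfl|rfl|rfl|rfl|rfl|rfl|rfl|rfl|rfl|rfl|rfl|rfl <;> decide
  · rw [A_right_notin _ b hx, B_right_notin _ b hx]

theorem teamLemma6 (b : String) :
    is_division_rival_py "CIN" b = is_division_rival_py_alt "CIN" b := by
  by_cases hx : b ∈ allTeams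
  · simp only [allTeams, flatPairs, List.map, List.mem_cons, List.not_mem_nil, or_false] at hx
    rcases hx with rfl|rfl|rfl|rfl|rfl|rfl|rfl|rfl|rfl|rfl|rfl|rfl|rfl|rfl|rfl|rfl|rfl|rfl|rfl|rfl|rfl|rfl|rfl|rfl|rfl|rfl|rfl|rfl|rfl|rfl|rfl|rfl <;> decide
  · rw [A_right_notin _ b hx, B_right_notin _ b hx]

theorem teamLemma7 (b : String) :
    is_division_rival_py "CLE" b = is_division_rival_py_alt "CLE" b := by
  by_cases hx : b ∈ allTeams
  · simp only [allTeams, flatPairs, List.map, List.mem_cons, List.not_mem_nil, or_false] at hx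
    rcases hx with rfl|rfl|rfl|rfl|rfl|rfl|rfl|rfl|rfl|rfl|rfl|rfl|rfl|rfl|rfl|rfl|rfl|rfl|rfl|rfl|rfl|rfl|rfl|rfl|rfl|rfl|rfl|rfl|rfl|rfl|rfl|rfl <;> decide
  · rw [A_right_notin _ b hx, B_right_notin _ b hx]

theorem teamLemma8 (b : String) :
    is_division_rival_py "PIT" b = is_division_rival_py_alt "PIT" b := by
  by_cases hx : b ∈ allTeams
  · simp only [allTeams, flatPairs, List.map, List.mem_cons, List.not_mem_nil, or_false] at hx
    rcases hx with rfl|rfl|rfl|rfl|rfl|rfl|rfl|rfl|rfl|rfl|rfl|rfl|rfl|rfl|rfl|rfl|rfl|rfl|rfl|rfl|rfl|rfl|rfl|rfl|rfl|rfl|rfl|rfl|rfl|rfl|rfl|rfl <;> decide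
  · rw [A_right_notin _ b hx, B_right_notin _ b hx]

theorem teamLemma9 (b : String) :
    is_division_rival_py "HOU" b = is_division_rival_py_alt "HOU" b := by
  by_cases hx : b ∈ allTeams
  · simp only [allTeams, flatPairs, List.map, List.mem_cons, List.not_mem_nil, or_false] at hx
    rcases hx with rfl|rfl|rfl|rfl|rfl|rfl|rfl|rfl|rfl|rfl|rfl|rfl|rfl|rfl|rfl|rfl|rfl|rfl|rfl|rfl|rfl|rfl|rfl|rfl|rfl|rfl|rfl|rfl|rfl|rfl|rfl|rfl <;> decide
  · rw [A_right_notin _ b hx, B_right_notin _ b hx]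

theorem teamLemma10 (b : String) :
    is_division_rival_py "IND" b = is_division_rival_py_alt "IND" b := by
  by_cases hx : b ∈ allTeams
  · simp only [allTeams, flatPairs, List.map, List.mem_cons, List.not_mem_nil, or_false] at hx
    rcases hx with rfl|rfl|rfl|rfl|rfl|rfl|rfl|rfl|rfl|rfl|rfl|rfl|rfl|rfl|rfl|rfl|rfl|rfl|rfl|rfl|rfl|rfl|rfl|rfl|rfl|rfl|rfl|rfl|rfl|rfl|rfl|rfl <;> decide
  · rw [A_right_notin _ b hx, B_right_notin _ b hx]

theorem teamLemma11 (b : String) :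
    is_division_rival_py "JAX" b = is_division_rival_py_alt "JAX" b := by
  by_cases hx : b ∈ allTeams
  · simp only [allTeams, flatPairs, List.map, List.mem_cons, List.not_mem_nil, or_false] at hx
    rcases hx with rfl|rfl|rfl|rfl|rfl|rfl|rfl|rfl|rfl|rfl|rfl|rfl|rfl|rfl|rfl|rfl|rfl|rfl|rfl|rfl|rfl|rfl|rfl|rfl|rfl|rfl|rfl|rfl|rfl|rfl|rfl|rfl <;> decide
  · rw [A_right_notin _ b hx, B_right_notin _ b hx]

theorem teamLemma12 (b : String) :
    is_division_rival_py "TEN" b = is_division_rival_py_alt "TEN" b := by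
  by_cases hx : b ∈ allTeams
  · simp only [allTeams, flatPairs, List.map, List.mem_cons, List.not_mem_nil, or_false] at hx
    rcases hx with rfl|rfl|rfl|rfl|rfl|rfl|rfl|rfl|rfl|rfl|rfl|rfl|rfl|rfl|rfl|rfl|rfl|rfl|rfl|rfl|rfl|rfl|rfl|rfl|rfl|rfl|rfl|rfl|rfl|rfl|rfl|rfl <;> decide
  · rw [A_right_notin _ b hx, B_right_notin _ b hx]

theorem teamLemma13 (b : String) :
    is_division_rival_py "DEN" b = is_division_rival_py_alt "DEN" b := by
  by_cases hx : b ∈ allTeams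
  · simp only [allTeams, flatPairs, List.map, List.mem_cons, List.not_mem_nil, or_false] at hx
    rcases hx with rfl|rfl|rfl|rfl|rfl|rfl|rfl|rfl|rfl|rfl|rfl|rfl|rfl|rfl|rfl|rfl|rfl|rfl|rfl|rfl|rfl|rfl|rfl|rfl|rfl|rfl|rfl|rfl|rfl|rfl|rfl|rfl <;> decide
  · rw [A_right_notin _ b hx, B_right_notin _ b hx]

theorem teamLemma14 (b : String) :
    is_division_rival_py "KC" b = is_division_rival_py_alt "KC" b := by
  by_cases hx : b ∈ allTeams
  · simp only [allTeams, flatPairs, List.map, List.mem_cons, List.not_mem_nil, or_false] at hx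
    rcases hx with rfl|rfl|rfl|rfl|rfl|rfl|rfl|rfl|rfl|rfl|rfl|rfl|rfl|rfl|rfl|rfl|rfl|rfl|rfl|rfl|rfl|rfl|rfl|rfl|rfl|rfl|rfl|rfl|rfl|rfl|rfl|rfl <;> decide
  · rw [A_right_notin _ b hx, B_right_notin _ b hx]

theorem teamLemma15 (b : String) :
    is_division_rival_py "LV" b = is_division_rival_py_alt "LV" b := by
  by_cases hx : b ∈ allTeams
  · simp only [allTeams, flatPairs, List.map, List.mem_cons, List.not_mem_nil, or_false] at hx
    rcases hx with rfl|rfl|rfl|rfl|rfl|rfl|rfl|rfl|rfl|rfl|rfl|rfl|rfl|rfl|rfl|rfl|rfl|rfl|rfl|rfl|rfl|rfl|rfl|rfl|rfl|rfl|rfl|rfl|rfl|rfl|rfl|rfl <;> decide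
  · rw [A_right_notin _ b hx, B_right_notin _ b hx]

theorem teamLemma16 (b : String) :
    is_division_rival_py "LAC" b = is_division_rival_py_alt "LAC" b := by
  by_cases hx : b ∈ allTeams
  · simp only [allTeams, flatPairs, List.map, List.mem_cons, List.not_mem_nil, or_false] at hx
    rcases hx with rfl|rfl|rfl|rfl|rfl|rfl|rfl|rfl|rfl|rfl|rfl|rfl|rfl|rfl|rfl|rfl|rfl|rfl|rfl|rfl|rfl|rfl|rfl|rfl|rfl|rfl|rfl|rfl|rfl|rfl|rfl|rfl <;> decide
  · rw [A_right_notin _ b hx, B_right_notin _ b hx]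

theorem teamLemma17 (b : String) :
    is_division_rival_py "DAL" b = is_division_rival_py_alt "DAL" b := by
  by_cases hx : b ∈ allTeams
  · simp only [allTeams, flatPairs, List.map, List.mem_cons, List.not_mem_nil, or_false] at hx
    rcases hx with rfl|rfl|rfl|rfl|rfl|rfl|rfl|rfl|rfl|rfl|rfl|rfl|rfl|rfl|rfl|rfl|rfl|rfl|rfl|rfl|rfl|rfl|rfl|rfl|rfl|rfl|rfl|rfl|rfl|rfl|rfl|rfl <;> decide
  · rw [A_right_notin _ b hx, B_right_notin _ b hx]

theorem teamLemma18 (b : String) :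
    is_division_rival_py "NYG" b = is_division_rival_py_alt "NYG" b := by
  by_cases hx : b ∈ allTeams
  · simp only [allTeams, flatPairs, List.map, List.mem_cons, List.not_mem_nil, or_false] at hx
    rcases hx with rfl|rfl|rfl|rfl|rfl|rfl|rfl|rfl|rfl|rfl|rfl|rfl|rfl|rfl|rfl|rfl|rfl|rfl|rfl|rfl|rfl|rfl|rfl|rfl|rfl|rfl|rfl|rfl|rfl|rfl|rfl|rfl <;> decide
  · rw [A_right_notin _ b hx, B_right_notin _ b hx]

theorem teamLemma19 (b : String) :
    is_division_rival_py "PHI" b = is_division_rival_py_alt "PHI" b := by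
  by_cases hx : b ∈ allTeams
  · simp only [allTeams, flatPairs, List.map, List.mem_cons, List.not_mem_nil, or_false] at hx
    rcases hx with rfl|rfl|rfl|rfl|rfl|rfl|rfl|rfl|rfl|rfl|rfl|rfl|rfl|rfl|rfl|rfl|rfl|rfl|rfl|rfl|rfl|rfl|rfl|rfl|rfl|rfl|rfl|rfl|rfl|rfl|rfl|rfl <;> decide
  · rw [A_right_notin _ b hx, B_right_notin _ b hx]

theorem teamLemma20 (b : String) :
    is_division_rival_py "WAS" b = is_division_rival_py_alt "WAS" b := by
  by_cases hx : b ∈ allTeams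
  · simp only [allTeams, flatPairs, List.map, List.mem_cons, List.not_mem_nil, or_false] at hx
    rcases hx with rfl|rfl|rfl|rfl|rfl|rfl|rfl|rfl|rfl|rfl|rfl|rfl|rfl|rfl|rfl|rfl|rfl|rfl|rfl|rfl|rfl|rfl|rfl|rfl|rfl|rfl|rfl|rfl|rfl|rfl|rfl|rfl <;> decide
  · rw [A_right_notin _ b hx, B_right_notin _ b hx]

theorem teamLemma21 (b : String) :
    is_division_rival_py "CHI" b = is_division_rival_py_alt "CHI" b := by
  by_cases hx : b ∈ allTeams
  · simp only [allTeams, flatPairs, List.map, List.mem_cons, List.not_mem_nil, or_false] at hx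
    rcases hx with rfl|rfl|rfl|rfl|rfl|rfl|rfl|rfl|rfl|rfl|rfl|rfl|rfl|rfl|rfl|rfl|rfl|rfl|rfl|rfl|rfl|rfl|rfl|rfl|rfl|rfl|rfl|rfl|rfl|rfl|rfl|rfl <;> decide
  · rw [A_right_notin _ b hx, B_right_notin _ b hx]

theorem teamLemma22 (b : String) :
    is_division_rival_py "DET" b = is_division_rival_py_alt "DET" b := by
  by_cases hx : b ∈ allTeams
  · simp only [allTeams, flatPairs, List.map, List.mem_cons, List.not_mem_nil, or_false] at hx
    rcases hx with rfl|rfl|rfl|rfl|rfl|rfl|rfl|rfl|rfl|rfl|rfl|rfl|rfl|rfl|rfl|rfl|rfl|rfl|rfl|rfl|rfl|rfl|rfl|rfl|rfl|rfl|rfl|rfl|rfl|rfl|rfl|rfl <;> decide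
  · rw [A_right_notin _ b hx, B_right_notin _ b hx]

theorem teamLemma23 (b : String) :
    is_division_rival_py "GB" b = is_division_rival_py_alt "GB" b := by
  by_cases hx : b ∈ allTeams
  · simp only [allTeams, flatPairs, List.map, List.mem_cons, List.not_mem_nil, or_false] at hx
    rcases hx with rfl|rfl|rfl|rfl|rfl|rfl|rfl|rfl|rfl|rfl|rfl|rfl|rfl|rfl|rfl|rfl|rfl|rfl|rfl|rfl|rfl|rfl|rfl|rfl|rfl|rfl|rfl|rfl|rfl|rfl|rfl|rfl <;> decide
  · rw [A_right_notin _ b hx, B_right_notin _ b hx]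

theorem teamLemma24 (b : String) :
    is_division_rival_py "MIN" b = is_division_rival_py_alt "MIN" b := by
  by_cases hx : b ∈ allTeams
  · simp only [allTeams, flatPairs, List.map, List.mem_cons, List.not_mem_nil, or_false] at hx
    rcases hx with rfl|rfl|rfl|rfl|rfl|rfl|rfl|rfl|rfl|rfl|rfl|rfl|rfl|rfl|rfl|rfl|rfl|rfl|rfl|rfl|rfl|rfl|rfl|rfl|rfl|rfl|rfl|rfl|rfl|rfl|rfl|rfl <;> decide
  · rw [A_right_notin _ b hx, B_right_notin _ b hx]

theorem teamLemma25 (b : String) :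
    is_division_rival_py "ATL" b = is_division_rival_py_alt "ATL" b := by
  by_cases hx : b ∈ allTeams
  · simp only [allTeams, flatPairs, List.map, List.mem_cons, List.not_mem_nil, or_false] at hx
    rcases hx with rfl|rfl|rfl|rfl|rfl|rfl|rfl|rfl|rfl|rfl|rfl|rfl|rfl|rfl|rfl|rfl|rfl|rfl|rfl|rfl|rfl|rfl|rfl|rfl|rfl|rfl|rfl|rfl|rfl|rfl|rfl|rfl <;> decide
  · rw [A_right_notin _ b hx, B_right_notin _ b hx]

theorem teamLemma26 (b : String) :
    is_division_rival_py "CAR" b = is_division_rival_py_alt "CAR" b := by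
  by_cases hx : b ∈ allTeams
  · simp only [allTeams, flatPairs, List.map, List.mem_cons, List.not_mem_nil, or_false] at hx
    rcases hx with rfl|rfl|rfl|rfl|rfl|rfl|rfl|rfl|rfl|rfl|rfl|rfl|rfl|rfl|rfl|rfl|rfl|rfl|rfl|rfl|rfl|rfl|rfl|rfl|rfl|rfl|rfl|rfl|rfl|rfl|rfl|rfl <;> decide
  · rw [A_right_notin _ b hx, B_right_notin _ b hx]

theorem teamLemma27 (b : String) :
    is_division_rival_py "NO" b = is_division_rival_py_alt "NO" b := by
  by_cases hx : b ∈ allTeams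
  · simp only [allTeams, flatPairs, List.map, List.mem_cons, List.not_mem_nil, or_false] at hx
    rcases hx with rfl|rfl|rfl|rfl|rfl|rfl|rfl|rfl|rfl|rfl|rfl|rfl|rfl|rfl|rfl|rfl|rfl|rfl|rfl|rfl|rfl|rfl|rfl|rfl|rfl|rfl|rfl|rfl|rfl|rfl|rfl|rfl <;> decide
  · rw [A_right_notin _ b hx, B_right_notin _ b hx]

theorem teamLemma28 (b : String) :
    is_division_rival_py "TB" b = is_division_rival_py_alt "TB" b := by
  by_cases hx : b ∈ allTeams
  · simp only [allTeams, flatPairs, List.map, List.mem_cons, List.not_mem_nil, or_false] at hx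
    rcases hx with rfl|rfl|rfl|rfl|rfl|rfl|rfl|rfl|rfl|rfl|rfl|rfl|rfl|rfl|rfl|rfl|rfl|rfl|rfl|rfl|rfl|rfl|rfl|rfl|rfl|rfl|rfl|rfl|rfl|rfl|rfl|rfl <;> decide
  · rw [A_right_notin _ b hx, B_right_notin _ b hx]

theorem teamLemma29 (b : String) :
    is_division_rival_py "ARI" b = is_division_rival_py_alt "ARI" b := by
  by_cases hx : b ∈ allTeams
  · simp only [allTeams, flatPairs, List.map, List.mem_cons, List.not_mem_nil, or_false] at hx
    rcases hx with rfl|rfl|rfl|rfl|rfl|rfl|rfl|rfl|rfl|rfl|rfl|rfl|rfl|rfl|rfl|rfl|rfl|rfl|rfl|rfl|rfl|rfl|rfl|rfl|rfl|rfl|rfl|rfl|rfl|rfl|rfl|rfl <;> decide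
  · rw [A_right_notin _ b hx, B_right_notin _ b hx]

theorem teamLemma30 (b : String) :
    is_division_rival_py "LAR" b = is_division_rival_py_alt "LAR" b := by
  by_cases hx : b ∈ allTeams
  · simp only [allTeams, flatPairs, List.map, List.mem_cons, List.not_mem_nil, or_false] at hx
    rcases hx with rfl|rfl|rfl|rfl|rfl|rfl|rfl|rfl|rfl|rfl|rfl|rfl|rfl|rfl|rfl|rfl|rfl|rfl|rfl|rfl|rfl|rfl|rfl|rfl|rfl|rfl|rfl|rfl|rfl|rfl|rfl|rfl <;> decide
  · rw [A_right_notin _ b hx, B_right_notin _ b hx]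

theorem teamLemma31 (b : String) :
    is_division_rival_py "SF" b = is_division_rival_py_alt "SF" b := by
  by_cases hx : b ∈ allTeams
  · simp only [allTeams, flatPairs, List.map, List.mem_cons, List.not_mem_nil, or_false] at hx
    rcases hx with rfl|rfl|rfl|rfl|rfl|rfl|rfl|rfl|rfl|rfl|rfl|rfl|rfl|rfl|rfl|rfl|rfl|rfl|rfl|rfl|rfl|rfl|rfl|rfl|rfl|rfl|rfl|rfl|rfl|rfl|rfl|rfl <;> decide
  · rw [A_right_notin _ b hx, B_right_notin _ b hx]

theorem teamLemma32 (b : String) :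
    is_division_rival_py "SEA" b = is_division_rival_py_alt "SEA" b := by
  by_cases hx : b ∈ allTeams
  · simp only [allTeams, flatPairs, List.map, List.mem_cons, List.not_mem_nil, or_false] at hx
    rcases hx with rfl|rfl|rfl|rfl|rfl|rfl|rfl|rfl|rfl|rfl|rfl|rfl|rfl|rfl|rfl|rfl|rfl|rfl|rfl|rfl|rfl|rfl|rfl|rfl|rfl|rfl|rfl|rfl|rfl|rfl|rfl|rfl <;> decide
  · rw [A_right_notin _ b hx, B_right_notin _ b hx]

theorem main_eq (a b : String) : is_division_rival_py a b = is_division_rival_py_alt a b := by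
  by_cases hx : a ∈ allTeams
  · simp only [allTeams, flatPairs, List.map, List.mem_cons, List.not_mem_nil, or_false] at hx
    rcases hx with rfl|rfl|rfl|rfl|rfl|rfl|rfl|rfl|rfl|rfl|rfl|rfl|rfl|rfl|rfl|rfl|rfl|rfl|rfl|rfl|rfl|rfl|rfl|rfl|rfl|rfl|rfl|rfl|rfl|rfl|rfl|rfl
    · exact teamLemma1 b
    · exact teamLemma2 b
    · exact teamLemma3 b
    · exact teamLemma4 b
    · exact teamLemma5 b
    · exact teamLemma6 b
    · exact teamLemma7 b
    · exact teamLemma8 b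
    · exact teamLemma9 b
    · exact teamLemma10 b
    · exact teamLemma11 b
    · exact teamLemma12 b
    · exact teamLemma13 b
    · exact teamLemma14 b
    · exact teamLemma15 b
    · exact teamLemma16 b
    · exact teamLemma17 b
    · exact teamLemma18 b
    · exact teamLemma19 b
    · exact teamLemma20 b
    · exact teamLemma21 b
    · exact teamLemma22 b
    · exact teamLemma23 b
    · exact teamLemma24 b
    · exact teamLemma25 b
    · exact teamLemma26 b
    · exact teamLemma27 b
    · exact teamLemma28 b
    · exact teamLemma29 b
    · exact teamLemma30 b
    · exact teamLemma31 b
    · exact teamLemma32 b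
  · rw [A_left_notin a b hx, B_left_notin a b hx]


-- ===== VERDICT (by name: the statement is the Claim_ definition above) =====
theorem is_division_rival_py_spec : Claim_equal_is_division_rival_py := by
  intro a b _
  unfold Spec_is_division_rival_py
  exact main_eq a b
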